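-- pv_equiv track=rewrite | github.com/jialen2/Faculty_movement | analyze/minimum_violation_ranking.py | find_MVR_n3
-- ===== SOURCE A (Python) =====
-- import csv, random, math, sys
--
-- def get_edge_weight(src, dest, edu_to_work):
--     if src not in edu_to_work:
--         return 0
--     if dest not in edu_to_work[src]:
--         return 0
--     return edu_to_work[src][dest]
--
-- def get_sign(num):
--     if num > 0:
--         return 1
--     elif num < 0:
--         return -1
--     else:
--         return 0
--
-- def calculate_ranking_score(ranking, edu_to_work):
--     score = 0
--     for i in range(len(ranking)):
--         for j in range(i, len(ranking)):
--             src = ranking[i]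
--             dest = ranking[j]
--             score += get_sign(j - i) * get_edge_weight(src, dest, edu_to_work)
--             score += get_sign(i - j) * get_edge_weight(dest, src, edu_to_work)
--     return score
--
-- def find_MVR_n3(curr_state, edu_to_work):
--     if len(curr_state) == 1 or len(curr_state) == 0:
--         return curr_state, 0
--     sorted_state, _ = find_MVR_n3(curr_state[1:len(curr_state)], edu_to_work)
--     max_score = -math.inf
--     max_index = -1
--     for i in range(len(sorted_state)):
--         tmp_state = sorted_state.copy()
--         tmp_state.insert(i, curr_state[0])
--         score = calculate_ranking_score(tmp_state, edu_to_work)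
--         if score > max_score:
--             max_score = score
--             max_index = i
--     last_state = sorted_state.copy()
--     last_state.insert(len(sorted_state), curr_state[0])
--     score = calculate_ranking_score(last_state, edu_to_work)
--     if score > max_score:
--         max_score = score
--         max_index = len(sorted_state)
--     max_state = sorted_state.copy()
--     max_state.insert(max_index, curr_state[0])
--     return max_state, max_score
-- ===== SOURCE B (Python) =====
-- def _w(src, dest, edu_to_work):
--     if src not in edu_to_work:
--         return 0
--     if dest not in edu_to_work[src]:
--         return 0
--     return edu_to_work[src][dest]
--
--
-- def find_MVR_n3(curr_state, edu_to_work):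
--     # Iterative greedy insertion (back to front), with O(1) incremental score
--     # updates per candidate position instead of re-scoring the whole ranking.
--     if len(curr_state) <= 1:
--         return list(curr_state), 0
--     ranking = [curr_state[-1]]
--     base = 0
--     for x in curr_state[-2::-1]:
--         d = [_w(x, y, edu_to_work) - _w(y, x, edu_to_work) for y in ranking]
--         total = sum(d)
--         # score of inserting x at position i = base + total - 2*sum(d[:i])
--         best_i = 0
--         best_s = base + total
--         prefix = 0
--         for i, dk in enumerate(d):
--             prefix += dk
--             s = base + total - 2 * prefix
--             if s > best_s:
--                 best_i = i + 1
--                 best_s = s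
--         ranking.insert(best_i, x)
--         base = best_s
--     return ranking, base
-- ===== Notes on version B (the rewrite author's own statement) =====
-- stated objective: faster
-- what changed: Replaced the O(n) full re-scorings of every candidate insertion (each O(n^2)) inside a recursive greedy insertion by an iterative back-to-front insertion loop that scores all candidate positions with O(1) incremental prefix-sum updates of the pairwise delta weights.
import Mathlib
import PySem

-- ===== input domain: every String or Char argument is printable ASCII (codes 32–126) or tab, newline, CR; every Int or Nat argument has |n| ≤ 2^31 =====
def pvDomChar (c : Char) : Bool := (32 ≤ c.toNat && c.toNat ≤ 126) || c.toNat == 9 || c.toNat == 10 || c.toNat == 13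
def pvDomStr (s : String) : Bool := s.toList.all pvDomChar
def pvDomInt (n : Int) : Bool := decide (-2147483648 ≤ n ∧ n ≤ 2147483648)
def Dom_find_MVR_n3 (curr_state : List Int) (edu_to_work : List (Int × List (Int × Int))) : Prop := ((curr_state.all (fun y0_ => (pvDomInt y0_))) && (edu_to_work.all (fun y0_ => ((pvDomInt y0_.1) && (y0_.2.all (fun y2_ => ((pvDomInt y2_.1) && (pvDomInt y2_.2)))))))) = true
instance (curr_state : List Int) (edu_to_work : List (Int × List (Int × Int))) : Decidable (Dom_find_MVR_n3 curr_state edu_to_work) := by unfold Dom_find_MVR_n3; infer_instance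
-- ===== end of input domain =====

-- B replaces A's recursion with full O(n^2) re-scoring of every candidate insertion position by an
-- iterative back-to-front insertion whose position scores are maintained by O(1) prefix-sum updates.

-- ===== PORT A =====
-- get_edge_weight: 'not in' followed by lookup collapses to get? (first match on the assoc list, exact)
def pvWeight (src dest : Int) (e : List (Int × List (Int × Int))) : Int :=
  match (PySem.Dict.mk e).get? src with
  | none => 0
  | some inner =>
    match (PySem.Dict.mk inner).get? dest with
    | none => 0
    | some w => w

def pvSign (num : Int) : Int := if num > 0 then 1 else if num < 0 then -1 else 0

def calcScore (ranking : List Int) (e : List (Int × List (Int × Int))) : Int :=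
  (PySem.List.pyRange 0 (ranking.length : Int) 1).foldl (fun score i =>
    (PySem.List.pyRange i (ranking.length : Int) 1).foldl (fun score j =>
      let src := PySem.List.pyGetD ranking i 0
      let dest := PySem.List.pyGetD ranking j 0
      score + pvSign (j - i) * pvWeight src dest e + pvSign (i - j) * pvWeight dest src e)
      score) 0

-- 'score > -math.inf': none models the initial -inf, against which any int wins
def pvGtInf (s : Int) (m : Option Int) : Bool :=
  match m with
  | none => true
  | some v => decide (v < s)

def find_MVR_n3 (curr_state : List Int) (edu_to_work : List (Int × List (Int × Int))) : List Int × Int :=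
  match curr_state with
  | [] => ([], 0)
  | [a] => ([a], 0)
  | a :: b :: t =>
    let sorted_state := (find_MVR_n3 (b :: t) edu_to_work).1
    let st := (PySem.List.pyRange 0 (sorted_state.length : Int) 1).foldl
      (fun (st : Option Int × Int) i =>
        let tmp_state := PySem.List.insert sorted_state i a
        let score := calcScore tmp_state edu_to_work
        if pvGtInf score st.1 then (some score, i) else st) (none, -1)
    let last_state := PySem.List.insert sorted_state (sorted_state.length : Int) a
    let score := calcScore last_state edu_to_work
    let st := if pvGtInf score st.1 then (some score, (sorted_state.length : Int)) else st
    let max_state := PySem.List.insert sorted_state st.2 a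
    (max_state, (st.1).getD 0)

-- ===== PORT B =====
def pvStep (e : List (Int × List (Int × Int))) (st : List Int × Int) (x : Int) : List Int × Int :=
  let ranking := st.1
  let base := st.2
  let d := ranking.map (fun y => pvWeight x y e - pvWeight y x e)
  let total := d.sum
  let r := (PySem.List.enumerate d 0).foldl
    (fun (acc : Int × Int × Int) p =>
      let pre := acc.1 + p.2
      let s := base + total - 2 * pre
      if s > acc.2.2 then (pre, p.1 + 1, s) else (pre, acc.2.1, acc.2.2))
    (0, 0, base + total)
  (PySem.List.insert ranking r.2.1 x, r.2.2)

-- curr_state[-2::-1] is the reverse of curr_state without its last element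
def find_MVR_n3_alt (curr_state : List Int) (edu_to_work : List (Int × List (Int × Int))) : List Int × Int :=
  if curr_state.length ≤ 1 then (curr_state, 0)
  else ((curr_state.dropLast).reverse).foldl (pvStep edu_to_work)
    ([PySem.List.pyGetD curr_state (-1) 0], 0)

-- ===== PRECONDITION & SPEC =====
def Spec_find_MVR_n3 (curr_state : List Int) (edu_to_work : List (Int × List (Int × Int))) (out : List Int × Int) : Prop := out = find_MVR_n3_alt curr_state edu_to_work
instance (curr_state : List Int) (edu_to_work : List (Int × List (Int × Int))) (out : List Int × Int) : Decidable (Spec_find_MVR_n3 curr_state edu_to_work out) := by unfold Spec_find_MVR_n3; infer_instance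

-- ===== CLAIM (what is proved, stated in full; the proofs are below) =====
def Claim_equal_find_MVR_n3 : Prop := ∀ (curr_state : List Int) (edu_to_work : List (Int × List (Int × Int))), Dom_find_MVR_n3 curr_state edu_to_work → Spec_find_MVR_n3 curr_state edu_to_work (find_MVR_n3 curr_state edu_to_work)

-- ===== LEMMAS AND PROOFS =====

-- pvD e x y: net gain of ordering x before y
def pvD (e : List (Int × List (Int × Int))) (x y : Int) : Int := pvWeight x y e - pvWeight y x e

-- structural pairwise score: pvS r = Σ_{i<j} pvD r_i r_j
def pvS (e : List (Int × List (Int × Int))) : List Int → Int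
  | [] => 0
  | a :: t => (t.map (pvD e a)).sum + pvS e t

-- score of inserting at position i (d = deltas against the current ranking, b = its score)
def pvF (b : Int) (d : List Int) (i : Int) : Int := b + d.sum - 2 * (d.take i.toNat).sum

-- first-strict-argmax scan over candidate positions; state = (best index, best score)
def pvR (f : Int → Int) (ps : List Int) (st : Int × Int) : Int × Int :=
  ps.foldl (fun st p => if f p > st.2 then (p, f p) else st) st

lemma pvD_anti (e : List (Int × List (Int × Int))) (x y : Int) : pvD e x y = -pvD e y x := by
  unfold pvD; ring

lemma calc_inner (e : List (Int × List (Int × Int))) (r : List Int) (i : Int)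
    (h0 : 0 ≤ i) (h1 : i < (r.length : Int)) (score : Int) :
    (PySem.List.pyRange i (r.length : Int) 1).foldl (fun score j =>
      score + pvSign (j - i) * pvWeight (PySem.List.pyGetD r i 0) (PySem.List.pyGetD r j 0) e
            + pvSign (i - j) * pvWeight (PySem.List.pyGetD r j 0) (PySem.List.pyGetD r i 0) e) score
    = score + ((r.drop (i.toNat + 1)).map (pvD e (PySem.List.pyGetD r i 0))).sum := by
  rw [PySem.List.pyRange_one_cons h1]
  rw [List.foldl_cons]
  have hself : score + pvSign (i - i) * pvWeight (PySem.List.pyGetD r i 0) (PySem.List.pyGetD r i 0) e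
      + pvSign (i - i) * pvWeight (PySem.List.pyGetD r i 0) (PySem.List.pyGetD r i 0) e = score := by
    simp [pvSign]
  rw [hself]
  have h2 : (PySem.List.pyRange (i + 1) (r.length : Int) 1).foldl (fun score j =>
      score + pvSign (j - i) * pvWeight (PySem.List.pyGetD r i 0) (PySem.List.pyGetD r j 0) e
            + pvSign (i - j) * pvWeight (PySem.List.pyGetD r j 0) (PySem.List.pyGetD r i 0) e) score
      = (PySem.List.pyRange (i + 1) (r.length : Int) 1).foldl (fun acc j =>
          acc + pvD e (PySem.List.pyGetD r i 0) (PySem.List.pyGetD r j 0)) score := by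
    apply PySem.List.foldl_congr_mem
    intro acc j hj
    rw [PySem.List.mem_pyRange_one] at hj
    have hs1 : pvSign (j - i) = 1 := by simp only [pvSign]; rw [if_pos (by omega)]
    have hs2 : pvSign (i - j) = -1 := by
      simp only [pvSign]; rw [if_neg (by omega), if_pos (by omega)]
    rw [hs1, hs2, pvD]
    ring
  rw [h2]
  have h3 := PySem.List.foldl_pyRange_pyGetD' (xs := r) (d := 0)
    (f := fun acc y => acc + pvD e (PySem.List.pyGetD r i 0) y) (init := score)
    (a := i + 1) (by omega)
  simp only at h3
  rw [h3, PySem.List.foldl_add, show (i + 1).toNat = i.toNat + 1 from by omega]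

lemma sum_range_eq_pvS (e : List (Int × List (Int × Int))) (r : List Int) :
    ((List.range r.length).map
      (fun k => ((r.drop (k + 1)).map (pvD e (r.getD k 0))).sum)).sum = pvS e r := by
  induction r with
  | nil => rfl
  | cons a t ih =>
    rw [List.length_cons, List.range_succ_eq_map]
    simp only [List.map_cons, List.map_map, List.sum_cons, pvS]
    rw [← ih]
    rfl

lemma calc_eq (e : List (Int × List (Int × Int))) (r : List Int) :
    calcScore r e = pvS e r := by
  unfold calcScore
  have h2 : (PySem.List.pyRange 0 (r.length : Int) 1).foldl (fun score i =>
      (PySem.List.pyRange i (r.length : Int) 1).foldl (fun score j =>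
        let src := PySem.List.pyGetD r i 0
        let dest := PySem.List.pyGetD r j 0
        score + pvSign (j - i) * pvWeight src dest e + pvSign (i - j) * pvWeight dest src e)
        score) 0
      = (PySem.List.pyRange 0 (r.length : Int) 1).foldl (fun score i =>
          score + ((r.drop (i.toNat + 1)).map (pvD e (PySem.List.pyGetD r i 0))).sum) 0 := by
    apply PySem.List.foldl_congr_mem
    intro acc i hi
    rw [PySem.List.mem_pyRange_one] at hi
    exact calc_inner e r i hi.1 hi.2 acc
  rw [h2, PySem.List.foldl_add, zero_add, PySem.List.pyRange_zero_nat, List.map_map]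
  rw [← sum_range_eq_pvS e r]
  congr 1
  apply List.map_congr_left
  intro k hk
  simp

lemma pvS_insert (e : List (Int × List (Int × Int))) (x : Int) (m : Nat) :
    ∀ (r : List Int), m ≤ r.length →
    pvS e (r.take m ++ x :: r.drop m)
      = pvS e r + (r.map (pvD e x)).sum - 2 * ((r.take m).map (pvD e x)).sum := by
  induction m with
  | zero =>
    intro r _
    simp [pvS]
    ring
  | succ m ih =>
    intro r hm
    cases r with
    | nil => simp at hm
    | cons a t =>
      have hm' : m ≤ t.length := by simpa using hm
      simp only [List.take_succ_cons, List.drop_succ_cons, List.cons_append, pvS,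
        List.map_append, List.map_cons, List.sum_append, List.sum_cons, List.map_take]
      rw [ih t hm']
      have hsplit : (t.map (pvD e a)).sum
          = ((t.take m).map (pvD e a)).sum + ((t.drop m).map (pvD e a)).sum := by
        rw [← List.sum_append, ← List.map_append, List.take_append_drop]
      have h1 := pvD_anti e a x
      simp only [← List.map_take] at *
      linarith [hsplit]

-- score of A's candidate list = pvF
lemma calc_insert (e : List (Int × List (Int × Int))) (r : List Int) (a b : Int)
    (hb : pvS e r = b) (i : Int) (h0 : 0 ≤ i) (h1 : i ≤ (r.length : Int)) :
    calcScore (PySem.List.insert r i a) e = pvF b (r.map (pvD e a)) i := by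
  have hm : i.toNat ≤ r.length := by omega
  rw [show i = (i.toNat : Int) from by omega]
  rw [PySem.List.insert_natCast r i.toNat a hm]
  rw [calc_eq, pvS_insert e a i.toNat r hm]
  simp only [pvF, List.map_take, Int.toNat_natCast, hb]

lemma foldl_opt_eq_pvR (f : Int → Int) (ps : List Int) : ∀ (bi bs : Int),
    ps.foldl (fun (st : Option Int × Int) i =>
        if pvGtInf (f i) st.1 then (some (f i), i) else st) (some bs, bi)
      = (some (pvR f ps (bi, bs)).2, (pvR f ps (bi, bs)).1) := by
  induction ps with
  | nil => intro bi bs; rfl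
  | cons p ps ih =>
    intro bi bs
    simp only [pvR, List.foldl_cons, pvGtInf]
    by_cases hc : bs < f p
    · simpa [pvR, hc] using ih p (f p)
    · simp only [hc, decide_false, if_false]
      exact ih bi bs

lemma pvR_inv (f : Int → Int) (n : Int) (ps : List Int)
    (hps : ∀ p ∈ ps, 0 ≤ p ∧ p ≤ n) : ∀ (bi bs : Int), bs = f bi → 0 ≤ bi → bi ≤ n →
    (pvR f ps (bi, bs)).2 = f (pvR f ps (bi, bs)).1
      ∧ 0 ≤ (pvR f ps (bi, bs)).1 ∧ (pvR f ps (bi, bs)).1 ≤ n := by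
  induction ps with
  | nil => intro bi bs h h0 h1; exact ⟨h.symm ▸ rfl, h0, h1⟩
  | cons p ps ih =>
    intro bi bs h h0 h1
    have hp := hps p (List.mem_cons_self ..)
    have hps' : ∀ q ∈ ps, 0 ≤ q ∧ q ≤ n := fun q hq => hps q (List.mem_cons_of_mem _ hq)
    simp only [pvR, List.foldl_cons]
    by_cases hc : f p > bs
    · simpa [pvR, hc] using ih hps' p (f p) rfl hp.1 hp.2
    · simpa [pvR, hc] using ih hps' bi bs h h0 h1

-- A's per-level insertion step, expressed through pvR
lemma Alevel_eq_R (e : List (Int × List (Int × Int))) (r : List Int) (a b : Int)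
    (hb : pvS e r = b) :
    (let st := (PySem.List.pyRange 0 (r.length : Int) 1).foldl
      (fun (st : Option Int × Int) i =>
        let tmp_state := PySem.List.insert r i a
        let score := calcScore tmp_state e
        if pvGtInf score st.1 then (some score, i) else st) (none, -1)
     let last_state := PySem.List.insert r (r.length : Int) a
     let score := calcScore last_state e
     let st := if pvGtInf score st.1 then (some score, (r.length : Int)) else st
     (PySem.List.insert r st.2 a, (st.1).getD 0))
    = (let f := pvF b (r.map (pvD e a))
       let res := pvR f (PySem.List.pyRange 1 ((r.length : Int) + 1) 1) (0, f 0)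
       (PySem.List.insert r res.1 a, res.2)) := by
  dsimp only
  have hcong : (PySem.List.pyRange 0 (r.length : Int) 1).foldl
      (fun (st : Option Int × Int) i =>
        if pvGtInf (calcScore (PySem.List.insert r i a) e) st.1
          then (some (calcScore (PySem.List.insert r i a) e), i) else st) (none, -1)
      = (PySem.List.pyRange 0 (r.length : Int) 1).foldl
      (fun (st : Option Int × Int) i =>
        if pvGtInf (pvF b (r.map (pvD e a)) i) st.1
          then (some (pvF b (r.map (pvD e a)) i), i) else st) (none, -1) := by
    apply PySem.List.foldl_congr_mem
    intro acc i hi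
    rw [PySem.List.mem_pyRange_one] at hi
    rw [calc_insert e r a b hb i hi.1 (le_of_lt hi.2)]
  rw [hcong]
  rw [calc_insert e r a b hb (r.length : Int) (by omega) (by omega)]
  rcases Nat.eq_zero_or_pos r.length with hz | hpos
  · rw [hz]
    rw [PySem.List.pyRange_one_eq_nil (by omega)]
    rw [PySem.List.pyRange_one_eq_nil (by omega)]
    simp [pvR, pvGtInf]
  · rw [PySem.List.pyRange_one_cons (by omega : (0:Int) < (r.length : Int)), List.foldl_cons]
    have hfirst : (if pvGtInf (pvF b (r.map (pvD e a)) 0) (none : Option Int)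
        then (some (pvF b (r.map (pvD e a)) 0), (0:Int)) else (none, -1))
        = ((some (pvF b (r.map (pvD e a)) 0), (0:Int)) : Option Int × Int) := rfl
    rw [hfirst]
    simp only [zero_add]
    rw [foldl_opt_eq_pvR (pvF b (r.map (pvD e a))) (PySem.List.pyRange 1 (r.length : Int) 1) 0
      (pvF b (r.map (pvD e a)) 0)]
    rw [show ((r.length : Int) + 1) = ((r.length : Int)) + 1 from rfl,
      PySem.List.pyRange_one_succ_right (by omega : (1:Int) ≤ (r.length : Int))]
    have happ : pvR (pvF b (r.map (pvD e a)))
        (PySem.List.pyRange 1 (r.length : Int) 1 ++ [(r.length : Int)]) (0, pvF b (r.map (pvD e a)) 0)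
        = (let R1 := pvR (pvF b (r.map (pvD e a))) (PySem.List.pyRange 1 (r.length : Int) 1)
            (0, pvF b (r.map (pvD e a)) 0)
           if pvF b (r.map (pvD e a)) (r.length : Int) > R1.2
            then ((r.length : Int), pvF b (r.map (pvD e a)) (r.length : Int)) else R1) := by
      simp only [pvR, List.foldl_append, List.foldl_cons, List.foldl_nil]
    rw [happ]
    set R1 := pvR (pvF b (r.map (pvD e a))) (PySem.List.pyRange 1 (r.length : Int) 1)
      (0, pvF b (r.map (pvD e a)) 0) with hR1
    by_cases hc : R1.2 < pvF b (r.map (pvD e a)) (r.length : Int)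
    · simp [pvGtInf, hc]
    · simp [pvGtInf, hc]

lemma enum_fold_eq_pvR (b : Int) (d : List Int) : ∀ (dl : List Int) (k : Nat), dl = d.drop k →
    ∀ (bi bs : Int),
    (PySem.List.enumerate dl (k : Int)).foldl
      (fun (acc : Int × Int × Int) p =>
        let pre := acc.1 + p.2
        let s := b + d.sum - 2 * pre
        if s > acc.2.2 then (pre, p.1 + 1, s) else (pre, acc.2.1, acc.2.2))
      ((d.take k).sum, bi, bs)
    = (d.sum, pvR (pvF b d) (PySem.List.pyRange ((k : Int) + 1) ((d.length : Int) + 1) 1) (bi, bs)) := by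
  intro dl
  induction dl with
  | nil =>
    intro k hk bi bs
    have hlen : d.length ≤ k := by
      by_contra hlt
      have := List.drop_eq_nil_iff.mp hk.symm
      omega
    rw [List.take_of_length_le hlen]
    rw [PySem.List.pyRange_one_eq_nil (by omega : ((d.length : Int) + 1) ≤ (k : Int) + 1)]
    rfl
  | cons dk dl ih =>
    intro k hk bi bs
    have hklt : k < d.length := by
      by_contra hge
      rw [List.drop_of_length_le (by omega)] at hk
      simp at hk
    have hget : d[k]? = some dk := by
      have := (List.getElem?_drop (xs := d) (i := k) (j := 0)).symm
      rw [← hk] at this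
      simpa using this
    have hdl : dl = d.drop (k + 1) := by
      have : List.drop 1 (List.drop k d) = List.drop (k + 1) d := by
        rw [List.drop_drop]
      rw [← hk] at this
      rw [← this]; simp
    have htake : (d.take (k + 1)).sum = (d.take k).sum + dk := by
      rw [List.take_add_one, hget]
      simp
    rw [PySem.List.enumerate_cons, List.foldl_cons]
    have hstep : (let pre := ((d.take k).sum, bi, bs).1 + (((k : Int), dk) : Int × Int).2
        let s := b + d.sum - 2 * pre
        if s > (((d.take k).sum, bi, bs) : Int × Int × Int).2.2
          then (pre, (((k : Int), dk) : Int × Int).1 + 1, s)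
          else (pre, ((d.take k).sum, bi, bs).2.1, (((d.take k).sum, bi, bs) : Int × Int × Int).2.2))
        = ((d.take (k + 1)).sum,
           if pvF b d ((k : Int) + 1) > bs then ((k : Int) + 1, pvF b d ((k : Int) + 1)) else (bi, bs)) := by
      have hf : b + d.sum - 2 * ((d.take k).sum + dk) = pvF b d ((k : Int) + 1) := by
        simp only [pvF, show ((k : Int) + 1).toNat = k + 1 from by omega, htake]
      simp only [htake, hf]
      by_cases hc : pvF b d ((k : Int) + 1) > bs
      · simp [hc, ← htake]
      · simp [hc, ← htake]
    rw [hstep]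
    by_cases hc : pvF b d ((k : Int) + 1) > bs
    · rw [if_pos hc]
      have := ih (k + 1) (by exact_mod_cast hdl) ((k : Int) + 1) (pvF b d ((k : Int) + 1))
      push_cast at this
      rw [this]
      rw [PySem.List.pyRange_one_cons (by omega : (k : Int) + 1 < (d.length : Int) + 1)]
      simp only [pvR, List.foldl_cons, if_pos hc]
    · rw [if_neg hc]
      have := ih (k + 1) (by exact_mod_cast hdl) bi bs
      push_cast at this
      rw [this]
      rw [PySem.List.pyRange_one_cons (by omega : (k : Int) + 1 < (d.length : Int) + 1)]
      simp only [pvR, List.foldl_cons, if_neg hc]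

-- B's per-level step, expressed through the same pvR
lemma step_eq_R (e : List (Int × List (Int × Int))) (r : List Int) (a b : Int) :
    pvStep e (r, b) a
    = (let f := pvF b (r.map (pvD e a))
       let res := pvR f (PySem.List.pyRange 1 ((r.length : Int) + 1) 1) (0, f 0)
       (PySem.List.insert r res.1 a, res.2)) := by
  have hd : r.map (fun y => pvWeight a y e - pvWeight y a e) = r.map (pvD e a) := rfl
  have h := enum_fold_eq_pvR b (r.map (pvD e a)) (r.map (pvD e a)) 0 rfl 0
    (b + (r.map (pvD e a)).sum)
  simp only [List.take_zero, List.sum_nil, Nat.cast_zero, zero_add, List.length_map] at h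
  have hf0 : pvF b (r.map (pvD e a)) 0 = b + (r.map (pvD e a)).sum := by
    simp [pvF]
  simp only [pvStep, hd]
  rw [h, hf0]

lemma alt_cons (e : List (Int × List (Int × Int))) (a bb : Int) (t : List Int) :
    find_MVR_n3_alt (a :: bb :: t) e = pvStep e (find_MVR_n3_alt (bb :: t) e) a := by
  cases t with
  | nil =>
    simp [find_MVR_n3_alt, PySem.List.pyGetD, PySem.List.pyGet?_neg_one]
  | cons c t =>
    simp only [find_MVR_n3_alt, List.length_cons]
    rw [if_neg (by simp), if_neg (by simp)]
    have hdl : (a :: bb :: c :: t).dropLast = a :: (bb :: c :: t).dropLast := rfl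
    rw [hdl, List.reverse_cons, List.foldl_append]
    have hlast : PySem.List.pyGetD (a :: bb :: c :: t) (-1) 0
        = PySem.List.pyGetD (bb :: c :: t) (-1) 0 := by
      simp [PySem.List.pyGetD, PySem.List.pyGet?_neg_one, List.getLast?_cons_cons]
    rw [hlast]
    rfl

lemma main_invariant (e : List (Int × List (Int × Int))) : ∀ (cs : List Int),
    find_MVR_n3 cs e = find_MVR_n3_alt cs e ∧ pvS e (find_MVR_n3 cs e).1 = (find_MVR_n3 cs e).2 := by
  intro cs
  induction cs with
  | nil => exact ⟨rfl, rfl⟩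
  | cons a rest ih =>
    cases rest with
    | nil => exact ⟨rfl, rfl⟩
    | cons bb t =>
      obtain ⟨ihe, ihs⟩ := ih
      have hA := Alevel_eq_R e (find_MVR_n3 (bb :: t) e).1 a (find_MVR_n3 (bb :: t) e).2 ihs
      have hB := step_eq_R e (find_MVR_n3 (bb :: t) e).1 a (find_MVR_n3 (bb :: t) e).2
      have hfind : find_MVR_n3 (a :: bb :: t) e
          = pvStep e (find_MVR_n3 (bb :: t) e) a := by
        rw [show find_MVR_n3 (bb :: t) e
            = ((find_MVR_n3 (bb :: t) e).1, (find_MVR_n3 (bb :: t) e).2) from rfl] at hB ⊢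
        rw [hB]
        rw [← hA]
        rfl
      refine ⟨?_, ?_⟩
      · rw [hfind, alt_cons, ihe]
      · rw [hfind]
        rw [show find_MVR_n3 (bb :: t) e
            = ((find_MVR_n3 (bb :: t) e).1, (find_MVR_n3 (bb :: t) e).2) from rfl] at hB
        rw [hB]
        dsimp only
        set r := (find_MVR_n3 (bb :: t) e).1
        set bsc := (find_MVR_n3 (bb :: t) e).2
        set f := pvF bsc (r.map (pvD e a)) with hf
        have hinv := pvR_inv f ((r.length : Int))
          (PySem.List.pyRange 1 ((r.length : Int) + 1) 1)
          (by
            intro p hp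
            rw [PySem.List.mem_pyRange_one] at hp
            omega) 0 (f 0) rfl (by omega) (by omega)
        set res := pvR f (PySem.List.pyRange 1 ((r.length : Int) + 1) 1) (0, f 0) with hres
        rw [← calc_eq, calc_insert e r a bsc ihs res.1 hinv.2.1 hinv.2.2, ← hf, ← hinv.1]

-- ===== VERDICT (by name: the statement is the Claim_ definition above) =====
theorem find_MVR_n3_spec : Claim_equal_find_MVR_n3 := by
  intro cs e _
  unfold Spec_find_MVR_n3
  exact (main_invariant e cs).1
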